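-- pv_equiv track=rewrite | github.com/tessambrown/Capstone | backend/api/lyrics.py | organizeSections
-- ===== SOURCE A (Python) =====
-- def organizeSections(lyrics):
--     # split the lyrics at "\n"
--     lyrics_lines = lyrics.split("\n")
--
--     sections = {}
--     current_section = None
--
--     # iterate through the lyrics
--     for line in lyrics_lines:
--
--             # when it gets to "[" -> "[section]" start of a new section
--             if line.startswith("[") and "]" in line:
--
--                 # assgin the new section to the header of a section of lyrics
--                 header = line.replace("[", "").replace("]", "")
--                 current_section = header
--
--                 if current_section not in sections:
--                     sections[current_section] = []
--
--                 continue
--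
--             # if it's not the header of a section it's lyrics and add lyrics to the current_section object
--             if current_section is not None:
--                 sections[current_section].append(line)
--
--     # once the loop is done return the section
--     return sections
-- ===== SOURCE B (Python) =====
-- def organizeSections(lyrics):
--     # Pass 1 (backwards): cut the lines into (header-key, body) chunks.
--     chunks = []
--     body = []
--     for line in reversed(lyrics.split("\n")):
--         if line.startswith("[") and "]" in line:
--             chunks.append((line.replace("[", "").replace("]", ""), body[::-1]))
--             body = []
--         else:
--             body.append(line)
--     # Pass 2: merge the chunks (in original order) into the dict.
--     sections = {}
--     for key, body in reversed(chunks):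
--         sections[key] = sections.get(key, []) + body
--     return sections
-- ===== Notes on version B (the rewrite author's own statement) =====
-- stated objective: alternative
-- what changed: B replaces A's single forward pass with a mutable current-section state by two passes: a backwards pass that cuts the lines into (header-key, body) chunks, then a merge pass folding the chunks into the dict.
import Mathlib
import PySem

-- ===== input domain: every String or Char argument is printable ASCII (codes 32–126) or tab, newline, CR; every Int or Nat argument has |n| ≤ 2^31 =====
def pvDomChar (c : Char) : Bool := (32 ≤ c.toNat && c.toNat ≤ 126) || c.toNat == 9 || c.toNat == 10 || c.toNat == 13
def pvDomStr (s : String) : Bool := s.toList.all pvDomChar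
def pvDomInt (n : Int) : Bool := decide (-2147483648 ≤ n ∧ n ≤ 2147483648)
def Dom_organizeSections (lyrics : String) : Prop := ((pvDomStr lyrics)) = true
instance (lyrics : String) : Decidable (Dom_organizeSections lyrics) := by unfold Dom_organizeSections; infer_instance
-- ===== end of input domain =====

-- B replaces A's single forward pass with mutable current-section state by a backwards
-- chunk-cutting pass plus a merge pass; same results, no speed claim (objective: alternative).

-- line.startswith("[") and "]" in line
def pvIsHeader (line : String) : Bool :=
  PySem.Str.startswith line "[" && PySem.Str.isIn "]" line

-- line.replace("[", "").replace("]", "")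
def pvHeaderKey (line : String) : String :=
  PySem.Str.replace (PySem.Str.replace line "[" "") "]" ""

-- ===== PORT A =====
-- the body of A's for-loop, as a step on the state (sections, current_section)
def pvStepA (st : PySem.Dict String (List String) × Option String) (line : String) :
    PySem.Dict String (List String) × Option String :=
  if pvIsHeader line then
    let header := pvHeaderKey line
    let d := if st.1.contains header then st.1 else st.1.insert header []
    (d, some header)
  else
    match st.2 with
    | some k => (st.1.modify k [] (fun b => b ++ [line]), st.2)
    | none => st

def organizeSections (lyrics : String) : List (String × List String) :=
  -- lyrics.split("\n"): split? is `some` for any non-empty separator, so getD [] is exact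
  let lyricsLines := (PySem.Str.split? lyrics "\n").getD []
  (lyricsLines.foldl pvStepA (PySem.Dict.empty, none)).1.items

-- ===== PORT B =====
def organizeSections_alt (lyrics : String) : List (String × List String) :=
  let lines := (PySem.Str.split? lyrics "\n").getD []
  -- pass 1: for line in reversed(lines): build (chunks, body)
  let st := lines.reverse.foldl
    (fun (st : List (String × List String) × List String) line =>
      if pvIsHeader line then (st.1 ++ [(pvHeaderKey line, st.2.reverse)], [])
      else (st.1, st.2 ++ [line]))
    ([], [])
  -- pass 2: for key, body in reversed(chunks): sections[key] = sections.get(key, []) + body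
  (st.1.reverse.foldl
    (fun (d : PySem.Dict String (List String)) kb => d.insert kb.1 (d.getD kb.1 [] ++ kb.2))
    PySem.Dict.empty).items

-- ===== PRECONDITION & SPEC =====
def Spec_organizeSections (lyrics : String) (out : List (String × List String)) : Prop := out = organizeSections_alt lyrics
instance (lyrics : String) (out : List (String × List String)) : Decidable (Spec_organizeSections lyrics out) := by unfold Spec_organizeSections; infer_instance

-- ===== CLAIM (what is proved, stated in full; the proofs are below) =====
def Claim_equal_organizeSections : Prop := ∀ (lyrics : String), Dom_organizeSections lyrics → Spec_organizeSections lyrics (organizeSections lyrics)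

-- ===== LEMMAS AND PROOFS =====

-- B's pass-1 step, foldr form (foldl over the reversed list = foldr)
def pvG (line : String) (st : List (String × List String) × List String) :
    List (String × List String) × List String :=
  if pvIsHeader line then (st.1 ++ [(pvHeaderKey line, st.2.reverse)], [])
  else (st.1, st.2 ++ [line])

def pvRecB (ls : List String) : List (String × List String) × List String :=
  ls.foldr pvG ([], [])

-- B's pass-2 step
def pvMerge (d : PySem.Dict String (List String)) (kb : String × List String) :
    PySem.Dict String (List String) :=
  d.insert kb.1 (d.getD kb.1 [] ++ kb.2)

-- A's appending of a block of lines to the current section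
def pvApp (d : PySem.Dict String (List String)) (k : String) (b : List String) :
    PySem.Dict String (List String) :=
  b.foldl (fun d x => d.modify k [] (fun v => v ++ [x])) d

-- the merge-fold's starting dict, by A's current_section
def pvBase (d : PySem.Dict String (List String)) (cur : Option String) (b : List String) :
    PySem.Dict String (List String) :=
  match cur with
  | none => d
  | some k => pvApp d k b

-- A's "if current not in sections: sections[current] = []"
def pvEnsure (d : PySem.Dict String (List String)) (k : String) :
    PySem.Dict String (List String) :=
  if d.contains k then d else d.insert k []

theorem pvApp_eq_insert (b : List String) (d : PySem.Dict String (List String)) (k : String)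
    (hb : b ≠ []) : pvApp d k b = d.insert k (d.getD k [] ++ b) := by
  induction b generalizing d with
  | nil => exact absurd rfl hb
  | cons x rest ih =>
    show pvApp (d.modify k [] (fun v => v ++ [x])) k rest = _
    have hm : d.modify k [] (fun v => v ++ [x]) = d.insert k (d.getD k [] ++ [x]) := rfl
    by_cases hr : rest = []
    · subst hr
      show d.modify k [] (fun v => v ++ [x]) = _
      rw [hm]
    · rw [ih _ hr, hm, PySem.Dict.getD_insert_self, PySem.Dict.insert_insert_self]
      simp

theorem pv_insert_getD_self (d : PySem.Dict String (List String)) (k : String)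
    (hnd : d.keys.Nodup) (hc : d.contains k = true) :
    d.insert k (d.getD k []) = d := by
  apply PySem.Dict.ext
  rw [PySem.Dict.items_insert_of_contains _ _ hc]
  conv_rhs => rw [← List.map_id d.items]
  apply List.map_congr_left
  intro p hp
  by_cases hpk : p.1 == k
  · simp only [hpk, if_true, id]
    have hk : p.1 = k := by simpa using hpk
    subst hk
    have : d.getD p.1 [] = p.2 := PySem.Dict.getD_of_mem_items _ (by simpa using hp) hnd []
    rw [this]
  · simp [hpk]

theorem pvChunk_step (d : PySem.Dict String (List String)) (k : String) (b : List String)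
    (hnd : d.keys.Nodup) : pvApp (pvEnsure d k) k b = pvMerge d (k, b) := by
  unfold pvEnsure pvMerge
  by_cases hb : b = []
  · subst hb
    by_cases hc : d.contains k
    · simp only [hc, if_true]
      show d = _
      rw [List.append_nil, pv_insert_getD_self d k hnd hc]
    · simp only [hc]
      show d.insert k [] = _
      rw [PySem.Dict.getD_of_not_contains _ _ (by simpa using hc), List.nil_append]
  · rw [pvApp_eq_insert _ _ _ hb]
    by_cases hc : d.contains k
    · simp [hc]
    · simp only [hc, if_false, Bool.false_eq_true]
      rw [PySem.Dict.getD_insert_self, PySem.Dict.insert_insert_self,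
        PySem.Dict.getD_of_not_contains _ _ (by simpa using hc), List.nil_append]

set_option maxHeartbeats 1000000 in
theorem pvMain (ls : List String) (d : PySem.Dict String (List String))
    (cur : Option String) (hnd : d.keys.Nodup)
    (hcur : ∀ k, cur = some k → d.contains k = true) :
    (ls.foldl pvStepA (d, cur)).1 =
      ((pvRecB ls).1.reverse).foldl pvMerge (pvBase d cur (pvRecB ls).2.reverse) := by
  induction ls generalizing d cur with
  | nil => cases cur with
    | none => rfl
    | some k => rfl
  | cons l ls ih =>
    have hrec : pvRecB (l :: ls) = pvG l (pvRecB ls) := rfl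
    by_cases hh : pvIsHeader l
    · have hstep : pvStepA (d, cur) l = (pvEnsure d (pvHeaderKey l), some (pvHeaderKey l)) := by
        simp [pvStepA, hh, pvEnsure]
      have hnd' : (pvEnsure d (pvHeaderKey l)).keys.Nodup := by
        unfold pvEnsure; split
        · exact hnd
        · exact PySem.Dict.nodup_keys_insert _ _ _ hnd
      have hc' : (pvEnsure d (pvHeaderKey l)).contains (pvHeaderKey l) = true := by
        unfold pvEnsure; split
        · assumption
        · exact PySem.Dict.contains_insert_self _ _ _
      show (ls.foldl pvStepA (pvStepA (d, cur) l)).1 = _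
      rw [hstep, ih (pvEnsure d (pvHeaderKey l)) (some (pvHeaderKey l)) hnd'
          (by intro k hk; cases hk; exact hc'),
        hrec]
      simp only [pvBase]
      rw [pvChunk_step d (pvHeaderKey l) (pvRecB ls).2.reverse hnd]
      simp only [pvG, hh, if_true, List.reverse_append, List.reverse_cons, List.reverse_nil,
        List.nil_append, List.singleton_append, List.foldl_cons]
      cases cur with
      | none => rfl
      | some k => rfl
    · cases cur with
      | none =>
        have hstep : pvStepA (d, none) l = (d, none) := by simp [pvStepA, hh]
        show (ls.foldl pvStepA (pvStepA (d, none) l)).1 = _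
        rw [hstep, ih d none hnd (by intro k hk; cases hk), hrec]
        simp only [pvG, hh, Bool.false_eq_true, if_false, pvBase]
      | some k =>
        have hc := hcur k rfl
        have hstep : pvStepA (d, some k) l = (d.modify k [] (fun v => v ++ [l]), some k) := by
          simp [pvStepA, hh]
        have hm : d.modify k [] (fun v => v ++ [l]) = d.insert k (d.getD k [] ++ [l]) := rfl
        have hnd' : (d.modify k [] (fun v => v ++ [l])).keys.Nodup := by
          rw [hm]; exact PySem.Dict.nodup_keys_insert _ _ _ hnd
        have hc' : (d.modify k [] (fun v => v ++ [l])).contains k = true := by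
          rw [hm]; exact PySem.Dict.contains_insert_self _ _ _
        show (ls.foldl pvStepA (pvStepA (d, some k) l)).1 = _
        rw [hstep, ih (d.modify k [] (fun v => v ++ [l])) (some k) hnd'
          (by intro k' hk'; cases hk'; exact hc'), hrec]
        simp only [pvBase]
        simp only [pvG, hh, Bool.false_eq_true, if_false, List.reverse_append,
          List.reverse_cons, List.reverse_nil, List.nil_append, List.singleton_append]
        rfl

-- ===== VERDICT (by name: the statement is the Claim_ definition above) =====
theorem organizeSections_spec : Claim_equal_organizeSections := by
  intro lyrics _
  unfold Spec_organizeSections organizeSections organizeSections_alt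
  simp only []
  rw [pvMain _ _ _ PySem.Dict.nodup_keys_empty (by intro k h; cases h)]
  have h1 : ((PySem.Str.split? lyrics "\n").getD []).reverse.foldl
      (fun (st : List (String × List String) × List String) line =>
        if pvIsHeader line then (st.1 ++ [(pvHeaderKey line, st.2.reverse)], [])
        else (st.1, st.2 ++ [line])) ([], []) = pvRecB ((PySem.Str.split? lyrics "\n").getD []) := by
    rw [List.foldl_reverse]; rfl
  rw [h1]; rfl
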